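-- pv_equiv track=rewrite | github.com/extremeshkipper/csv-city-report-json | main4.py | group_by_city
-- ===== SOURCE A (Python) =====
-- def group_by_city(data):
--     result = {}
--     for item in data:
--         city = item["city"]
--         if city in result:
--             result[city] += 1
--         else:
--             result[city] = 1
--
--     return result
-- ===== SOURCE B (Python) =====
-- def group_by_city(data):
--     cities = [item["city"] for item in data]
--     return {c: cities.count(c) for c in dict.fromkeys(cities)}
-- ===== Notes on version B (the rewrite author's own statement) =====
-- stated objective: alternative
-- what changed: B replaces A's single accumulating dict pass with a two-phase decomposition: collect all city values, dedup them preserving first occurrence, then build the result by counting each distinct city with list.count.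
import Mathlib
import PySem

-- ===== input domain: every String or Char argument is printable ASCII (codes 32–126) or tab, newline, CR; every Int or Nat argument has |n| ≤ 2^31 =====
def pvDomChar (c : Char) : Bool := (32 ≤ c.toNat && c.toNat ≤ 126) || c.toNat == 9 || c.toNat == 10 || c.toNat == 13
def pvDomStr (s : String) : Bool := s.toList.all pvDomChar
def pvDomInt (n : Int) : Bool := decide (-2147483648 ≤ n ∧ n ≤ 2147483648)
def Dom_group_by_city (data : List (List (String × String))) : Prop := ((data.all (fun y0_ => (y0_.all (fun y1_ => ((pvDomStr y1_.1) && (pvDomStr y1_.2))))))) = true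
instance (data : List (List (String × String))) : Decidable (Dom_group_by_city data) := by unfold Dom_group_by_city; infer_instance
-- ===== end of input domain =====

-- B rebuilds the same counting dict by a two-phase decomposition (collect city values, dedup, count each) instead of A's accumulating dict pass; objective: alternative.


-- ===== PORT A =====
-- item["city"]: first-match lookup in the association list; total form, exact under Pre_ (key present)
def cityOf (item : List (String × String)) : String :=
  ((PySem.Dict.mk item).get? "city").getD ""

def group_by_city (data : List (List (String × String))) : List (String × Int) :=
  (data.foldl (fun result item =>
      let city := cityOf item
      if result.contains city then result.modify city 0 (· + 1)
      else result.insert city 1)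
    PySem.Dict.empty).items

-- ===== PORT B =====
def group_by_city_alt (data : List (List (String × String))) : List (String × Int) :=
  let cities := data.map cityOf
  (PySem.List.dedup cities).map (fun c => (c, (PySem.List.count cities c : Int)))

-- ===== PRECONDITION & SPEC =====
-- Pre_ excludes exactly the items lacking a "city" key, on which A raises KeyError (B raises there too).
def Pre_group_by_city (data : List (List (String × String))) : Prop :=
  ∀ item ∈ data, (PySem.Dict.mk item).contains "city" = true
instance (data : List (List (String × String))) : Decidable (Pre_group_by_city data) := by unfold Pre_group_by_city; infer_instance

def pvWitness_group_by_city : (List (List (String × String))) :=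
  [[("city", "NYC")], [("city", "LA"), ("pop", "4m")], [("city", "NYC")]]

def Spec_group_by_city (data : List (List (String × String))) (out : List (String × Int)) : Prop := out = group_by_city_alt data
instance (data : List (List (String × String))) (out : List (String × Int)) : Decidable (Spec_group_by_city data out) := by unfold Spec_group_by_city; infer_instance

-- ===== CLAIM (what is proved, stated in full; the proofs are below) =====
def Claim_equal_group_by_city : Prop := ∀ (data : List (List (String × String))), Dom_group_by_city data → Pre_group_by_city data → Spec_group_by_city data (group_by_city data)

-- ===== LEMMAS AND PROOFS =====

-- A's loop body is exactly the Counter step, for every dict and key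
lemma stepA_eq_modify (d : PySem.Dict String Int) (c : String) :
    (if d.contains c then d.modify c 0 (· + 1) else d.insert c 1) = d.modify c 0 (· + 1) := by
  by_cases h : d.contains c = true
  · simp [h]
  · simp only [Bool.not_eq_true] at h
    simp [h, PySem.Dict.modify, PySem.Dict.getD_of_not_contains _ _ h]

-- ===== VERDICT (by name: the statement is the Claim_ definition above) =====
theorem group_by_city_spec : Claim_equal_group_by_city := by
  intro data _ _
  unfold Spec_group_by_city group_by_city group_by_city_alt
  simp only [stepA_eq_modify]
  have h1 : (data.foldl (fun result item => result.modify (cityOf item) 0 (fun x => x + 1))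
        (PySem.Dict.empty : PySem.Dict String Int)) = PySem.Dict.counter (data.map cityOf) := by
    rw [PySem.Dict.counter_eq_foldl, List.foldl_map]
  rw [h1, PySem.Dict.items_counter]
  simp [PySem.List.count_eq]
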